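-- pv_equiv track=rewrite | github.com/judeah666/portableapps-launcher-maker | app/portableapps_launcher_maker.py | normalize_registry_path
-- ===== SOURCE A (Python) =====
-- REGISTRY_ROOT_ALIASES = {
--     "HKEY_CLASSES_ROOT": "HKCR",
--     "HKEY_CURRENT_USER": "HKCU",
--     "HKEY_LOCAL_MACHINE": "HKLM",
--     "HKEY_USERS": "HKU",
--     "HKEY_CURRENT_CONFIG": "HKCC",
-- }
--
-- def normalize_registry_path(path: str) -> str:
--     candidate = (path or "").strip().lstrip("\\")
--     if not candidate:
--         return ""
--     for full_name, alias in REGISTRY_ROOT_ALIASES.items():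
--         if candidate == full_name:
--             return alias
--         prefix = full_name + "\\"
--         if candidate.startswith(prefix):
--             return alias + "\\" + candidate[len(prefix):]
--     return candidate
-- ===== SOURCE B (Python) =====
-- REGISTRY_ROOT_ALIASES = {
--     "HKEY_CLASSES_ROOT": "HKCR",
--     "HKEY_CURRENT_USER": "HKCU",
--     "HKEY_LOCAL_MACHINE": "HKLM",
--     "HKEY_USERS": "HKU",
--     "HKEY_CURRENT_CONFIG": "HKCC",
-- }
--
-- def normalize_registry_path(path: str) -> str:
--     candidate = (path or "").strip().lstrip("\\")
--     head, sep, tail = candidate.partition("\\")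
--     alias = REGISTRY_ROOT_ALIASES.get(head)
--     if alias is None:
--         return candidate
--     return alias + sep + tail
-- ===== Notes on version B (the rewrite author's own statement) =====
-- stated objective: simpler
-- what changed: Replaces the per-alias scan with equality and startswith tests by a single partition on the first backslash followed by one dict lookup of the head.
import Mathlib
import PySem

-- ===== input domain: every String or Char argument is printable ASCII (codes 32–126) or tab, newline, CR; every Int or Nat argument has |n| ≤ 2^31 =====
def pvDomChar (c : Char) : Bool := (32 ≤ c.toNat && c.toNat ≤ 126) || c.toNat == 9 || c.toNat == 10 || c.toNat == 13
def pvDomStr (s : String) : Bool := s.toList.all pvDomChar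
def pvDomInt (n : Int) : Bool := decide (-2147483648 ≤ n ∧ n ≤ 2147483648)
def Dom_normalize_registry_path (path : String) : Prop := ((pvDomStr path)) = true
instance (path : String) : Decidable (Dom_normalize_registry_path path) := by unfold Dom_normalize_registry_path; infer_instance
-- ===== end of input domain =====

-- B replaces A's per-alias scan by one partition at the first backslash plus a single dict lookup (simpler).

-- ===== PORT A =====
def pvAliasPairs : List (List Char × List Char) :=
  [("HKEY_CLASSES_ROOT".toList, "HKCR".toList),
   ("HKEY_CURRENT_USER".toList, "HKCU".toList),
   ("HKEY_LOCAL_MACHINE".toList, "HKLM".toList),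
   ("HKEY_USERS".toList, "HKU".toList),
   ("HKEY_CURRENT_CONFIG".toList, "HKCC".toList)]

-- candidate = (path or "").strip().lstrip("\\"); lstrip("\\") drops leading backslashes (exact hand port)
def pvCandidate (path : String) : List Char :=
  (PySem.Chars.strip (if path == "" then "" else path).toList).dropWhile (fun c => c == '\\')

-- the 'for full_name, alias in REGISTRY_ROOT_ALIASES.items()' loop of A
def pvLoopA (cand : List Char) : List (List Char × List Char) → List Char
  | [] => cand
  | (full, al) :: rest =>
    if cand == full then al
    else if PySem.Chars.startswith cand (full ++ ['\\']) then
      al ++ ['\\'] ++ PySem.Chars.slice cand (some ((full ++ ['\\']).length : Int)) none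
    else pvLoopA cand rest

def normalize_registry_path (path : String) : String :=
  let cand := pvCandidate path
  if cand.isEmpty then "" else String.ofList (pvLoopA cand pvAliasPairs)

-- ===== PORT B =====
def pvAliasDict : PySem.Dict (List Char) (List Char) := PySem.Dict.ofList pvAliasPairs

-- s.partition("\\") for the one-character separator: first occurrence via find (exact hand port)
def pvPartitionBS (s : List Char) : List Char × List Char × List Char :=
  let i := PySem.Chars.find s ['\\']
  if i = -1 then (s, [], [])
  else (s.take i.toNat, ['\\'], s.drop (i.toNat + 1))

def normalize_registry_path_alt (path : String) : String :=
  let cand := pvCandidate path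
  let p := pvPartitionBS cand
  match PySem.Dict.get? pvAliasDict p.1 with
  | none => String.ofList cand
  | some al => String.ofList (al ++ p.2.1 ++ p.2.2)

-- ===== PRECONDITION & SPEC =====
def Spec_normalize_registry_path (path : String) (out : String) : Prop := out = normalize_registry_path_alt path
instance (path : String) (out : String) : Decidable (Spec_normalize_registry_path path out) := by unfold Spec_normalize_registry_path; infer_instance

-- ===== CLAIM (what is proved, stated in full; the proofs are below) =====
def Claim_equal_normalize_registry_path : Prop := ∀ (path : String), Dom_normalize_registry_path path → Spec_normalize_registry_path path (normalize_registry_path path)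

-- ===== LEMMAS AND PROOFS =====

lemma pv_singleton_infix {a : Char} {l : List Char} : ([a] <:+: l) ↔ a ∈ l := by
  constructor
  · intro h; exact h.sublist.subset (by simp)
  · intro h
    obtain ⟨s, t, rfl⟩ := List.append_of_mem h
    exact ⟨s, t, by simp⟩

lemma pv_singleton_prefix {a : Char} {l : List Char} : ([a] <+: l) ↔ ∃ t, l = a :: t := by
  cases l with
  | nil => simp
  | cons b t =>
    constructor
    · intro h; rcases List.cons_prefix_cons.mp h with ⟨rfl, -⟩; exact ⟨t, rfl⟩
    · rintro ⟨t', h⟩; cases h; exact ⟨t, rfl⟩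

lemma pv_partition_no_bs {s : List Char} (h : ('\\' : Char) ∉ s) : pvPartitionBS s = (s, [], []) := by
  unfold pvPartitionBS
  have : PySem.Chars.find s ['\\'] = -1 :=
    (PySem.Chars.find_eq_neg_one_iff _ _).mpr (fun hin => h (pv_singleton_infix.mp hin))
  simp [this]

lemma pv_partition_prefix {full r : List Char} (hfull : ('\\' : Char) ∉ full) :
    pvPartitionBS (full ++ '\\' :: r) = (full, ['\\'], r) := by
  set s := full ++ '\\' :: r with hs
  have hmem : ('\\' : Char) ∈ s := by simp [hs]
  have hnn : 0 ≤ PySem.Chars.find s ['\\'] :=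
    (PySem.Chars.find_nonneg_iff _ _).mpr (pv_singleton_infix.mpr hmem)
  obtain ⟨hocc, hmin⟩ := PySem.Chars.find_spec hnn
  set n := (PySem.Chars.find s ['\\']).toNat with hn
  -- occurrence at full.length
  have hoccL : ([('\\' : Char)] <+: s.drop full.length) := by
    rw [hs, List.drop_left]
    exact pv_singleton_prefix.mpr ⟨r, rfl⟩
  have hle : n ≤ full.length := by
    by_contra hlt
    exact hmin full.length (by omega) hoccL
  -- n cannot be < full.length
  obtain ⟨t, ht⟩ := pv_singleton_prefix.mp hocc
  have hge : ¬ n < full.length := by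
    intro hlt
    have hsn : s[n]? = some '\\' := by
      have h0 := congrArg (fun l => l[0]?) ht
      simpa [List.getElem?_drop] using h0
    have : full[n]? = some '\\' := by
      rw [hs] at hsn
      rwa [List.getElem?_append_left hlt] at hsn
    exact hfull (List.mem_of_getElem? this)
  have hnn' : n = full.length := by omega
  have hne : PySem.Chars.find s ['\\'] ≠ -1 :=
    (PySem.Chars.find_ne_neg_one_iff _ _).mpr (pv_singleton_infix.mpr hmem)
  unfold pvPartitionBS
  simp only [hne, ← hn, hnn']
  rw [hs]
  refine Prod.ext ?_ (Prod.ext rfl ?_)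
  · simp
  · simp [List.drop_append]

lemma pv_loop_eq (cand : List Char) (L : List (List Char × List Char))
    (h : ∀ p ∈ L, ('\\' : Char) ∉ p.1) :
    pvLoopA cand L =
      (match (PySem.Dict.mk L).get? (pvPartitionBS cand).1 with
       | none => cand
       | some al => al ++ (pvPartitionBS cand).2.1 ++ (pvPartitionBS cand).2.2) := by
  induction L with
  | nil =>
    simp [pvLoopA, PySem.Dict.get?]
  | cons p rest ih =>
    obtain ⟨full, al⟩ := p
    have hfull : ('\\' : Char) ∉ full := h (full, al) (by simp)
    rw [pvLoopA]
    by_cases heq : cand = full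
    · subst heq
      rw [if_pos (by simp)]
      rw [pv_partition_no_bs hfull]
      rw [PySem.Dict.get?_mk_cons]
      simp
    · rw [if_neg (by simpa using heq)]
      by_cases hsw : PySem.Chars.startswith cand (full ++ ['\\']) = true
      · rw [if_pos hsw]
        obtain ⟨r, hr⟩ : ∃ r, cand = full ++ '\\' :: r := by
          obtain ⟨r, hr⟩ := (PySem.Chars.startswith_iff _ _).mp hsw
          exact ⟨r, by simpa using hr.symm⟩
        subst hr
        rw [pv_partition_prefix hfull]
        rw [PySem.Dict.get?_mk_cons]
        have hslice : PySem.Chars.slice (full ++ '\\' :: r) (some (((full ++ ['\\']).length : Nat) : Int))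
            = r := by
          simp only [PySem.Chars.slice_eq_listSlice]
          rw [PySem.List.slice_from (full ++ '\\' :: r) (a := (((full ++ ['\\']).length : Nat) : Int)) (by omega)]
          have h1 : ((((full ++ ['\\']).length : Nat) : Int)).toNat = full.length + 1 := by simp
          rw [h1]
          simp [List.drop_append]
        rw [hslice]
        simp
      · rw [if_neg hsw]
        rw [ih (fun q hq => h q (by simp [hq]))]
        have hhead : (pvPartitionBS cand).1 ≠ full := by
          by_cases hbs : ('\\' : Char) ∈ cand
          · have hnn : 0 ≤ PySem.Chars.find cand ['\\'] :=
              (PySem.Chars.find_nonneg_iff _ _).mpr (pv_singleton_infix.mpr hbs)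
            obtain ⟨hocc, -⟩ := PySem.Chars.find_spec hnn
            obtain ⟨t, ht⟩ := pv_singleton_prefix.mp hocc
            have hcand : cand = cand.take (PySem.Chars.find cand ['\\']).toNat ++ '\\' :: t := by
              conv_lhs => rw [← List.take_append_drop (PySem.Chars.find cand ['\\']).toNat cand, ht]
            intro hcontra
            have hne : PySem.Chars.find cand ['\\'] ≠ -1 := by omega
            have : (pvPartitionBS cand).1 = cand.take (PySem.Chars.find cand ['\\']).toNat := by
              unfold pvPartitionBS; simp [hne]
            rw [this] at hcontra
            apply hsw
            rw [PySem.Chars.startswith_iff]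
            exact ⟨t, by rw [← hcontra]; simpa using hcand.symm⟩
          · rw [pv_partition_no_bs hbs]
            exact heq
        rw [PySem.Dict.get?_mk_cons]
        rw [if_neg (by simp only [beq_iff_eq]; exact fun hx => hhead hx.symm)]

lemma pv_dict_eq : pvAliasDict = PySem.Dict.mk pvAliasPairs := by decide

lemma pv_no_bs_table : ∀ p ∈ pvAliasPairs, ('\\' : Char) ∉ p.1 := by decide

lemma pv_main (cand : List Char) :
    (if cand.isEmpty then "" else String.ofList (pvLoopA cand pvAliasPairs)) =
      (match PySem.Dict.get? pvAliasDict (pvPartitionBS cand).1 with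
       | none => String.ofList cand
       | some al => String.ofList (al ++ (pvPartitionBS cand).2.1 ++ (pvPartitionBS cand).2.2)) := by
  rw [pv_dict_eq, pv_loop_eq cand pvAliasPairs pv_no_bs_table]
  by_cases hemp : cand.isEmpty
  · have : cand = [] := by simpa [List.isEmpty_iff] using hemp
    subst this
    decide
  · rw [if_neg hemp]
    cases (PySem.Dict.mk pvAliasPairs).get? (pvPartitionBS cand).1 <;> simp

-- ===== VERDICT (by name: the statement is the Claim_ definition above) =====
theorem normalize_registry_path_spec : Claim_equal_normalize_registry_path := by
  intro path _
  exact pv_main (pvCandidate path)
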